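-- pv_equiv track=rewrite | github.com/MattKinnison/FFstats | fantasy.py | seeding
-- ===== SOURCE A (Python) =====
-- def seeding(num_teams):
--     full_brack = []
--     brack = [[1]]
--     for seed in range(2,num_teams+1):
--         #split
--         unpaired = [game for game in brack if len(game) == 1]
--         if len(unpaired) == 0:
--             full_brack.append(brack)
--             new_brack = []
--             for game in brack:
--                 new_brack.append([game[0]])
--                 new_brack.append([game[1]])
--             brack = new_brack
--             unpaired = brack
--         #insert
--         in_game = max(unpaired)
--         brack = [game if game != in_game else [in_game[0],seed] for game in brack]
--     full_brack.append(brack)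
--     full_brack.reverse()
--
--     return full_brack
-- ===== SOURCE B (Python) =====
-- def seeding(num_teams):
--     if num_teams <= 1:
--         return [[[1]]]
--     order = [1]
--     full = []
--     while 2 * len(order) < num_teams:
--         pairs = [[x, 2 * len(order) + 1 - x] for x in order]
--         full.append(pairs)
--         order = [y for p in pairs for y in p]
--     t = 2 * len(order) + 1
--     top = [[x, t - x] if t - x <= num_teams else [x] for x in order]
--     return [top] + full[::-1]
-- ===== Notes on version B (the rewrite author's own statement) =====
-- stated objective: faster
-- what changed: Instead of inserting each seed one at a time with a rescan of the bracket per seed, B builds the seeding order of each round once by a doubling recurrence (each round's order is the flattening of the previous round's pairs) and pairs seed x with 2^(k+1)+1-x directly, marking the top round's games paired only when the partner seed exists.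
import Mathlib
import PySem

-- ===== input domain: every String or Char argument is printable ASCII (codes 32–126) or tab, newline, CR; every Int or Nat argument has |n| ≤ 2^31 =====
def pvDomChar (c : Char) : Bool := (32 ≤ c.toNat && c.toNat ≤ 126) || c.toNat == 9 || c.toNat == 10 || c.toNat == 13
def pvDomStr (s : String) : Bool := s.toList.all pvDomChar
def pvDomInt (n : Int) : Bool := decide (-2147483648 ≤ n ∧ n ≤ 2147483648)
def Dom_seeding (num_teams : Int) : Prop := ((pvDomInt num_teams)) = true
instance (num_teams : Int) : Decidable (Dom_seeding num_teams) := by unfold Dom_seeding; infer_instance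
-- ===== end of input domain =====

-- B replaces A's per-seed rescan-and-insert loop by a doubling recurrence that builds each
-- round's seeding order once and pairs x with 2^(k+1)+1-x directly (objective: faster).

-- ===== PORT A =====
-- loop body of A's 'for seed in range(2, num_teams+1)' (state = (full_brack, brack))
def seedStep (st : List (List (List Int)) × List (List Int)) (seed : Int) :
    List (List (List Int)) × List (List Int) :=
  let full_brack := st.1
  let brack := st.2
  let unpaired := brack.filter (fun game => game.length == 1)
  -- 'if len(unpaired) == 0': split every game into two singleton games (unreachable pyGet?
  -- defaults: every game there has length 2, so pyGet? is some)
  let fbu : List (List (List Int)) × List (List Int) × List (List Int) :=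
    if unpaired.length == 0 then
      let full_brack := full_brack ++ [brack]
      let new_brack := brack.foldl (fun acc game =>
        acc ++ [[(PySem.List.pyGet? game 0).getD 0]] ++ [[(PySem.List.pyGet? game 1).getD 0]]) []
      (full_brack, new_brack, new_brack)
    else (full_brack, brack, unpaired)
  -- 'in_game = max(unpaired)': Python compares lists lexicographically = Mathlib's order on
  -- List Int; unpaired is never empty here, so the .getD [] default is unreachable
  let in_game := (PySem.List.max? fbu.2.2 (fun g => g)).getD []
  let brack := fbu.2.1.map (fun game =>
    if game ≠ in_game then game else [(PySem.List.pyGet? in_game 0).getD 0, seed])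
  (fbu.1, brack)

def seeding (num_teams : Int) : List (List (List Int)) :=
  let st := (PySem.List.pyRange 2 (num_teams + 1)).foldl seedStep ([], [[1]])
  (st.1 ++ [st.2]).reverse

-- ===== PORT B =====
-- Source B's while-loop; fuel = num_teams.toNat only makes the recursion structural (the order
-- doubles each iteration, so the loop runs far fewer times than fuel allows)
def loopB (fuel : Nat) (n : Int) (order : List Int) (full : List (List (List Int))) :
    List Int × List (List (List Int)) :=
  match fuel with
  | 0 => (order, full)
  | fuel + 1 =>
    if 2 * (order.length : Int) < n then
      let pairs := order.map (fun x => [x, 2 * (order.length : Int) + 1 - x])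
      loopB fuel n pairs.flatten (full ++ [pairs])
    else (order, full)

def seeding_alt (num_teams : Int) : List (List (List Int)) :=
  if num_teams ≤ 1 then [[[1]]]
  else
    let of := loopB num_teams.toNat num_teams [1] []
    let t := 2 * (of.1.length : Int) + 1
    let top := of.1.map (fun x => if t - x ≤ num_teams then [x, t - x] else [x])
    top :: of.2.reverse

-- ===== PRECONDITION & SPEC =====
def Spec_seeding (num_teams : Int) (out : List (List (List Int))) : Prop := out = seeding_alt num_teams
instance (num_teams : Int) (out : List (List (List Int))) : Decidable (Spec_seeding num_teams out) := by unfold Spec_seeding; infer_instance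

-- ===== CLAIM (what is proved, stated in full; the proofs are below) =====
def Claim_equal_seeding : Prop := ∀ (num_teams : Int), Dom_seeding num_teams → Spec_seeding num_teams (seeding num_teams)

-- ===== LEMMAS AND PROOFS =====

-- the seeding order of the round with 2^j slots
def ordL : Nat → List Int
  | 0 => [1]
  | j + 1 => (ordL j).flatMap (fun x => [x, 2 ^ (j + 1) + 1 - x])

-- the game of seed x in the top round after seeds 1..s have been placed
def gm (j : Nat) (s : Int) (x : Int) : List Int :=
  if 2 ^ (j + 1) + 1 - x ≤ s then [x, 2 ^ (j + 1) + 1 - x] else [x]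

def pRound (j : Nat) (s : Int) : List (List Int) := (ordL j).map (gm j s)

def fullRound (j : Nat) : List (List Int) := (ordL j).map (fun x => [x, 2 ^ (j + 1) + 1 - x])

def roundsL (j : Nat) : List (List (List Int)) := (List.range j).map fullRound

lemma mem_ordL {j : Nat} {x : Int} : x ∈ ordL j ↔ 1 ≤ x ∧ x ≤ 2 ^ j := by
  induction j generalizing x with
  | zero => simp only [ordL, List.mem_singleton, pow_zero]; omega
  | succ j ih =>
    have hP : (0:Int) < 2 ^ j := by positivity
    have h2p : (2:Int) ^ (j+1) = 2 * 2 ^ j := by ring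
    simp only [ordL, List.mem_flatMap, List.mem_cons, List.not_mem_nil, or_false]
    constructor
    · rintro ⟨y, hy, rfl | rfl⟩ <;> (have := ih.mp hy; omega)
    · rintro ⟨hx1, hx2⟩
      by_cases hc : x ≤ 2 ^ j
      · exact ⟨x, ih.mpr ⟨hx1, hc⟩, Or.inl rfl⟩
      · exact ⟨2 ^ (j+1) + 1 - x, ih.mpr ⟨by omega, by omega⟩, Or.inr (by omega)⟩

lemma length_ordL (j : Nat) : ((ordL j).length : Int) = 2 ^ j := by
  induction j with
  | zero => rfl
  | succ j ih =>
    have h2p : (2:Int) ^ (j+1) = 2 * 2 ^ j := by ring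
    simp only [ordL, List.length_flatMap]
    rw [show (fun x : Int => ([x, 2 ^ (j+1) + 1 - x] : List Int).length) = fun _ : Int => 2 by
      funext x; rfl]
    rw [List.map_const', List.sum_replicate, smul_eq_mul]
    push_cast
    omega

lemma singleton_lt_iff {a b : Int} : (([a] : List Int) < [b]) ↔ a < b := by
  show List.lt [a] [b] ↔ a < b
  rw [List.lt_iff_lex_lt]
  constructor
  · intro h
    cases h with
    | rel h => exact h
    | cons h => cases h
  · exact fun h => List.Lex.rel h

lemma max?_single_cons (x : Int) (t : List Int) :
    PySem.List.max? ((x :: t).map (fun v => ([v] : List Int))) (fun g => g)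
      = some [t.foldl max x] := by
  induction t generalizing x with
  | nil => rfl
  | cons y t ih =>
    have key : PySem.List.max? ((x :: y :: t).map (fun v => ([v] : List Int))) (fun g => g)
        = PySem.List.max? ((max x y :: t).map (fun v => ([v] : List Int))) (fun g => g) := by
      unfold PySem.List.max?
      simp only [List.map_cons, List.foldl_cons]
      show List.foldl _ (if ([x] : List Int) < [y] then some [y] else some [x])
          (t.map (fun v => ([v] : List Int)))
        = List.foldl _ (some [max x y]) (t.map (fun v => ([v] : List Int)))
      rcases Int.lt_or_le x y with h | h
      · rw [if_pos (singleton_lt_iff.mpr h), max_eq_right (le_of_lt h)]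
      · rw [if_neg (fun hc => absurd (singleton_lt_iff.mp hc) (not_lt.mpr h)), max_eq_left h]
    rw [key, ih (max x y)]
    simp only [List.foldl_cons]

lemma max?_map_singleton {l : List Int} {m : Int} (hm : m ∈ l) (hmax : ∀ y ∈ l, y ≤ m) :
    PySem.List.max? (l.map (fun x => ([x] : List Int))) (fun g => g) = some [m] := by
  cases l with
  | nil => simp at hm
  | cons x t =>
    rw [max?_single_cons x t]
    have h1 := (PySem.List.le_foldl_max t x).1
    have h2 := (PySem.List.le_foldl_max t x).2
    have h3 := PySem.List.foldl_max_mem t x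
    have hfm : t.foldl max x = m := by
      apply le_antisymm
      · rcases h3 with h | h
        · rw [h]; exact hmax x (by simp)
        · exact hmax _ (List.mem_cons_of_mem _ h)
      · rcases List.mem_cons.mp hm with rfl | h
        · exact h1
        · exact h2 m h
    rw [hfm]

lemma unpaired_eq (j : Nat) (s : Int) :
    (pRound j s).filter (fun g => g.length == 1)
      = ((ordL j).filter (fun x => decide (x ≤ 2 ^ (j + 1) - s))).map (fun x => [x]) := by
  unfold pRound
  rw [List.filter_map]
  have hfc : ∀ x ∈ ordL j, ((fun g : List Int => g.length == 1) ∘ gm j s) x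
      = decide (x ≤ 2 ^ (j+1) - s) := by
    intro x _
    simp only [Function.comp_apply, gm]
    split_ifs with h <;> simp <;> omega
  rw [List.filter_congr hfc]
  apply List.map_congr_left
  intro x hx
  rw [List.mem_filter] at hx
  have hx2 : x ≤ 2 ^ (j+1) - s := by simpa using hx.2
  unfold gm
  rw [if_neg (by omega)]

lemma split_helper (j : Nat) (l : List Int) :
    ((l.map (fun x => ([x, 2 ^ (j+1) + 1 - x] : List Int))).foldl (fun acc game =>
        acc ++ [[(PySem.List.pyGet? game 0).getD 0]] ++ [[(PySem.List.pyGet? game 1).getD 0]]) [])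
      = (l.flatMap (fun x => [x, 2 ^ (j+1) + 1 - x])).map (fun x => ([x] : List Int)) := by
  simp only [List.append_assoc]
  rw [PySem.List.foldl_append_eq_flatMap
    (g := fun game => [[(PySem.List.pyGet? game 0).getD 0]] ++ [[(PySem.List.pyGet? game 1).getD 0]])]
  simp only [List.nil_append]
  induction l with
  | nil => rfl
  | cons x t ih =>
    simp only [List.map_cons, List.flatMap_cons, List.map_append, ih]
    rfl

lemma stepLt {j : Nat} {s : Int} (h1 : 2 ^ j < s) (h2 : s < 2 ^ (j + 1)) :
    seedStep (roundsL j, pRound j s) (s + 1) = (roundsL j, pRound j (s + 1)) := by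
  have h2p : (2:Int) ^ (j+1) = 2 * 2 ^ j := by ring
  set B : Int := 2 ^ (j+1) - s with hB
  have hBmem : B ∈ ordL j := mem_ordL.mpr ⟨by omega, by omega⟩
  have hU := unpaired_eq j s
  have hBf : B ∈ (ordL j).filter (fun x => decide (x ≤ B)) :=
    List.mem_filter.mpr ⟨hBmem, by simp⟩
  have hmax : PySem.List.max? (((ordL j).filter (fun x => decide (x ≤ B))).map
      (fun x => ([x] : List Int))) (fun g => g) = some [B] :=
    max?_map_singleton hBf (fun y hy => by simpa using (List.mem_filter.mp hy).2)
  have hcond : ((((ordL j).filter (fun x => decide (x ≤ B))).map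
      (fun x => ([x] : List Int))).length == 0) = false := by
    have hpos := List.length_pos_of_mem
      (List.mem_map_of_mem (f := fun x => ([x] : List Int)) hBf)
    simpa using hpos.ne'
  unfold seedStep
  dsimp only
  rw [hU, ← hB, hcond]
  simp only [Bool.false_eq_true, if_false]
  rw [hmax]
  simp only [Option.getD_some]
  refine congrArg (Prod.mk (roundsL j)) ?_
  unfold pRound
  rw [List.map_map]
  apply List.map_congr_left
  intro x hx
  obtain ⟨hx1, hx2⟩ := mem_ordL.mp hx
  simp only [Function.comp_apply, gm]
  by_cases hpair : 2 ^ (j+1) + 1 - x ≤ s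
  · rw [if_pos hpair,
      if_pos (show ([x, 2 ^ (j+1) + 1 - x] : List Int) ≠ [B] by simp),
      if_pos (show 2 ^ (j+1) + 1 - x ≤ s + 1 by omega)]
  · rw [if_neg hpair]
    by_cases hxB : x = B
    · rw [hxB, if_neg (show ¬(([B] : List Int) ≠ [B]) by simp),
        if_pos (show 2 ^ (j+1) + 1 - B ≤ s + 1 by omega)]
      have hv : 2 ^ (j+1) + 1 - B = s + 1 := by omega
      rw [hv]
      rfl
    · rw [if_pos (show (([x] : List Int) ≠ [B]) by simp [hxB]),
        if_neg (show ¬(2 ^ (j+1) + 1 - x ≤ s + 1) by omega)]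

lemma stepEq {j : Nat} {s : Int} (hs : s = 2 ^ (j + 1)) :
    seedStep (roundsL j, pRound j s) (s + 1) = (roundsL (j + 1), pRound (j + 1) (s + 1)) := by
  have h2p : (2:Int) ^ (j+1+1) = 2 * 2 ^ (j+1) := by ring
  have hP : (0:Int) < 2 ^ (j+1) := by positivity
  have hU : (pRound j s).filter (fun g => g.length == 1) = [] := by
    rw [unpaired_eq j s]
    rw [List.filter_eq_nil_iff.mpr ?_]
    · rfl
    · intro x hx
      have := mem_ordL.mp hx
      simp only [decide_eq_true_eq]
      omega
  have hfull : pRound j s = fullRound j := by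
    unfold pRound fullRound
    apply List.map_congr_left
    intro x hx
    have := mem_ordL.mp hx
    unfold gm
    rw [if_pos (by omega)]
  have hrounds : roundsL (j+1) = roundsL j ++ [fullRound j] := by
    unfold roundsL
    rw [List.range_succ, List.map_append]
    rfl
  have hnew : (fullRound j).foldl (fun acc game =>
      acc ++ [[(PySem.List.pyGet? game 0).getD 0]] ++ [[(PySem.List.pyGet? game 1).getD 0]]) []
      = (ordL (j+1)).map (fun x => ([x] : List Int)) := by
    unfold fullRound
    rw [split_helper j (ordL j)]
    rfl
  have hsm : s ∈ ordL (j+1) := mem_ordL.mpr ⟨by omega, by omega⟩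
  have hmax : PySem.List.max? ((ordL (j+1)).map (fun x => ([x] : List Int))) (fun g => g)
      = some [s] :=
    max?_map_singleton hsm (fun y hy => by have := mem_ordL.mp hy; omega)
  unfold seedStep
  dsimp only
  rw [hU]
  simp only [List.length_nil, beq_self_eq_true, if_true]
  rw [hfull, hnew, hmax]
  simp only [Option.getD_some]
  rw [hrounds]
  refine congrArg (Prod.mk (roundsL j ++ [fullRound j])) ?_
  unfold pRound
  rw [List.map_map]
  apply List.map_congr_left
  intro x hx
  obtain ⟨hx1, hx2⟩ := mem_ordL.mp hx
  simp only [Function.comp_apply, gm]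
  by_cases hxs : x = s
  · rw [hxs, if_neg (show ¬(([s] : List Int) ≠ [s]) by simp),
      if_pos (show 2 ^ (j+1+1) + 1 - s ≤ s + 1 by omega)]
    have hv : 2 ^ (j+1+1) + 1 - s = s + 1 := by omega
    rw [hv]
    rfl
  · rw [if_pos (show (([x] : List Int) ≠ [s]) by simp [hxs]),
      if_neg (show ¬(2 ^ (j+1+1) + 1 - x ≤ s + 1) by omega)]

lemma A_loop (m : Nat) (hm : 2 ≤ m) :
    ∃ j : Nat, (2 : Int) ^ j < (m : Int) ∧ (m : Int) ≤ 2 ^ (j + 1) ∧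
      (PySem.List.pyRange 2 ((m : Int) + 1)).foldl seedStep ([], [[1]])
        = (roundsL j, pRound j (m : Int)) := by
  induction m, hm using Nat.le_induction with
  | base =>
    refine ⟨0, by norm_num, by norm_num, ?_⟩
    decide
  | succ m hm ih =>
    obtain ⟨j, hj1, hj2, heq⟩ := ih
    have hcast : ((m + 1 : Nat) : Int) = (m : Int) + 1 := by push_cast; ring
    rw [hcast, PySem.List.pyRange_one_succ_right (by omega), List.foldl_append, heq]
    by_cases hcase : (m : Int) < 2 ^ (j+1)
    · have hstep := stepLt hj1 hcase
      refine ⟨j, by omega, by omega, ?_⟩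
      simp only [List.foldl_cons, List.foldl_nil]
      exact hstep
    · have hm2 : (m : Int) = 2 ^ (j+1) := le_antisymm hj2 (not_lt.mp hcase)
      have hstep := stepEq hm2
      have h2p : (2:Int) ^ (j+2) = 2 * 2 ^ (j+1) := by ring
      have hP : (0:Int) < 2 ^ (j+1) := by positivity
      refine ⟨j + 1, by omega, by omega, ?_⟩
      simp only [List.foldl_cons, List.foldl_nil]
      exact hstep

lemma loopB_spec (fuel : Nat) (n : Int) (j : Nat)
    (h1 : (2 : Int) ^ j < n) (h2 : n ≤ 2 ^ (j + fuel + 1)) :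
    ∃ J : Nat, (2 : Int) ^ J < n ∧ n ≤ 2 ^ (J + 1) ∧
      loopB fuel n (ordL j) (roundsL j) = (ordL J, roundsL J) := by
  induction fuel generalizing j with
  | zero => exact ⟨j, h1, by simpa using h2, rfl⟩
  | succ fuel ih =>
    by_cases hc : n ≤ 2 ^ (j+1)
    · refine ⟨j, h1, hc, ?_⟩
      unfold loopB
      rw [if_neg (by rw [show (2:Int) * ((ordL j).length : Int) = 2 ^ (j+1) by
        rw [length_ordL]; ring]; omega)]
    · have hc' : 2 ^ (j+1) < n := not_le.mp hc
      unfold loopB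
      rw [if_pos (by rw [show (2:Int) * ((ordL j).length : Int) = 2 ^ (j+1) by
        rw [length_ordL]; ring]; omega)]
      have hpairs : (ordL j).map (fun x => [x, 2 * ((ordL j).length : Int) + 1 - x])
          = fullRound j := by
        simp only [length_ordL]
        unfold fullRound
        apply List.map_congr_left
        intro x _
        have h2j : (2:Int) * 2 ^ j = 2 ^ (j+1) := by ring
        rw [h2j]
      simp only [hpairs]
      have hflat : (fullRound j).flatten = ordL (j+1) := by
        unfold fullRound
        rw [← List.flatMap_def]
        rfl
      rw [hflat, show roundsL j ++ [fullRound j] = roundsL (j+1) by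
        unfold roundsL; rw [List.range_succ, List.map_append]; rfl]
      exact ih (j+1) hc' (by
        have hadd : j + 1 + fuel + 1 = j + (fuel + 1) + 1 := by omega
        rw [hadd]; exact h2)

lemma pow_bounds_unique {j k : Nat} {n : Int}
    (hj1 : (2 : Int) ^ j < n) (hj2 : n ≤ 2 ^ (j + 1))
    (hk1 : (2 : Int) ^ k < n) (hk2 : n ≤ 2 ^ (k + 1)) : j = k := by
  rcases lt_trichotomy j k with h | h | h
  · have hle : (2:Int) ^ (j+1) ≤ 2 ^ k := pow_le_pow_right₀ (by norm_num) (by omega)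
    linarith
  · exact h
  · have hle : (2:Int) ^ (k+1) ≤ 2 ^ j := pow_le_pow_right₀ (by norm_num) (by omega)
    linarith

-- ===== VERDICT (by name: the statement is the Claim_ definition above) =====
theorem seeding_spec : Claim_equal_seeding := by
  intro n _
  unfold Spec_seeding seeding seeding_alt
  by_cases hn : n ≤ 1
  · rw [if_pos hn]
    have hr : PySem.List.pyRange 2 (n + 1) = [] := by
      simp [PySem.List.pyRange, show ¬(2 < n + 1) from by omega]
    rw [hr]
    rfl
  · rw [if_neg hn]
    have hn' : 1 < n := not_le.mp hn
    have h0 : 0 ≤ n := by omega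
    lift n to Nat using h0 with m
    obtain ⟨j, hj1, hj2, hA⟩ := A_loop m (by exact_mod_cast hn')
    have hfuel : ((m : Int)).toNat = m := Int.toNat_natCast m
    have hpow : (m : Int) ≤ 2 ^ (0 + m + 1) := by
      have ha : m < 2 ^ m := Nat.lt_two_pow_self
      have hb : (2:Nat) ^ m ≤ 2 ^ (0 + m + 1) := Nat.pow_le_pow_right (by norm_num) (by omega)
      exact_mod_cast le_of_lt (lt_of_lt_of_le ha hb)
    obtain ⟨J, hJ1, hJ2, hB⟩ := loopB_spec m (m : Int) 0 (by exact_mod_cast hn') hpow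
    have hJj : J = j := pow_bounds_unique hJ1 hJ2 hj1 hj2
    subst hJj
    simp only [hA]
    rw [hfuel, show ([1] : List Int) = ordL 0 from rfl,
      show ([] : List (List (List Int))) = roundsL 0 from rfl, hB]
    simp only [List.reverse_append, List.reverse_cons]
    refine congrArg₂ List.cons ?_ rfl
    unfold pRound
    simp only [length_ordL]
    apply List.map_congr_left
    intro x _
    unfold gm
    rw [show (2:Int) * 2 ^ J + 1 = 2 ^ (J+1) + 1 by ring]
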